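-- pv_equiv track=rewrite | github.com/florianepicolo/stoechio-teleosts | 2_get-interaction.py | get_oneway
-- ===== SOURCE A (Python) =====
-- def test_nbgenes(gene1, gene2):
--     if len(gene1) == 1:
--         if len(gene2) == 1:
--             return 0            # 1 gène de chaque côté
--         return 2                # 1 gène pour le gène 1, et plusieurs gènes pr le gène 2
--     else:
--         if len(gene2) == 1:
--             return 1            # plusieurs gènes pour le gène 1, mais 1 gène pour le gène 1
--         return 3                # plusieurs gènes pour les 2 !
--
-- def get_oneway(relations, gene1, gene2):
--     if test_nbgenes(gene1, gene2) == 0:                 # si un gène de chaque côté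
--         relations.append([gene1, gene2])
--     elif test_nbgenes(gene1, gene2) == 1:               # si plusieurs gènes sous gène 1
--         for i in range(len(gene1)):
--             relations.append([gene1[i], gene2])
--     elif test_nbgenes(gene1, gene2) == 2:               # si plusieurs gènes sous gène 2
--         for j in range(len(gene2)):
--             relations.append([gene1, gene2[j]])
--     elif test_nbgenes(gene1, gene2) == 3:               # si plusieurs gènes pour les 2 !
--         for i in range(len(gene1)):
--             for j in range(len(gene2)):
--                 relations.append([gene1[i], gene2[j]])
--     return relations
-- ===== SOURCE B (Python) =====
-- def get_oneway(relations, gene1, gene2):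
--     # One uniform element-wise Cartesian product (lefts outer, rights inner);
--     # mutates `relations` in place like the original.
--     relations.extend([l, r] for l in gene1 for r in gene2)
--     return relations
-- ===== Notes on version B (the rewrite author's own statement) =====
-- stated objective: simpler
-- what changed: Replaces the four-way cardinality dispatch (test_nbgenes called repeatedly, four distinct append loops) by one uniform element-wise Cartesian product extend.
-- outside the precondition, e.g. on get_oneway([], ['a'], ['b']): A returns [[['a'], ['b']]], B returns [['a', 'b']]
import Mathlib
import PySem

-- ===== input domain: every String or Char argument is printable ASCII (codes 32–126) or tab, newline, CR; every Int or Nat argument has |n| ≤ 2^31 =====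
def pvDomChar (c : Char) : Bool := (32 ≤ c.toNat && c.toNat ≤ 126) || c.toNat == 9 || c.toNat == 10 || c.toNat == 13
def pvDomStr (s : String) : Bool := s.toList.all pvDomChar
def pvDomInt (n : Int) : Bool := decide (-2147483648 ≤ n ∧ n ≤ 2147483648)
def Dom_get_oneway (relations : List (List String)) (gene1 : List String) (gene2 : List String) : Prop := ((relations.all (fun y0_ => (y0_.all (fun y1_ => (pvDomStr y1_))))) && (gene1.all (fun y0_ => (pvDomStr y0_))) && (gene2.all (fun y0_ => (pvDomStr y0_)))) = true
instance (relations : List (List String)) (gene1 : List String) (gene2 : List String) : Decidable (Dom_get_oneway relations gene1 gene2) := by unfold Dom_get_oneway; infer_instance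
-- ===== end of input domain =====

-- ===== PORT A =====
-- B changes the decomposition only (one uniform element-wise Cartesian product instead of
-- A's four-way cardinality dispatch); both mutate `relations` in place in Python.
def test_nbgenes (gene1 : List String) (gene2 : List String) : Int :=
  if gene1.length = 1 then
    (if gene2.length = 1 then 0 else 2)
  else
    (if gene2.length = 1 then 1 else 3)

-- In the branches where Python appends the WHOLE list object ([gene1, gene2], [gene1[i], gene2],
-- [gene1, gene2[j]]), the value is not of the declared list[list[str]] type; those inputs are
-- excluded by Pre_get_oneway below, and the stand-in appends here (gene1 ++ gene2 etc.) are
-- never reached on admitted inputs (branch 0 is excluded outright; branches 1/2 only occur with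
-- an empty loop range inside Pre_).
def get_oneway (relations : List (List String)) (gene1 : List String) (gene2 : List String) : List (List String) :=
  if test_nbgenes gene1 gene2 = 0 then
    relations ++ [gene1 ++ gene2]
  else if test_nbgenes gene1 gene2 = 1 then
    (PySem.List.pyRange 0 (gene1.length : Int) 1).foldl
      (fun acc i => acc ++ [[PySem.List.pyGetD gene1 i ""] ++ gene2]) relations
  else if test_nbgenes gene1 gene2 = 2 then
    (PySem.List.pyRange 0 (gene2.length : Int) 1).foldl
      (fun acc j => acc ++ [gene1 ++ [PySem.List.pyGetD gene2 j ""]]) relations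
  else
    (PySem.List.pyRange 0 (gene1.length : Int) 1).foldl
      (fun acc i =>
        (PySem.List.pyRange 0 (gene2.length : Int) 1).foldl
          (fun acc2 j => acc2 ++ [[PySem.List.pyGetD gene1 i "", PySem.List.pyGetD gene2 j ""]]) acc)
      relations

-- ===== PORT B =====
def get_oneway_alt (relations : List (List String)) (gene1 : List String) (gene2 : List String) : List (List String) :=
  relations ++ gene1.flatMap (fun l => gene2.map (fun r => [l, r]))

-- ===== PRECONDITION & SPEC =====
-- Pre_ excludes inputs where a length-1 side actually gets appended: there Python A appends the
-- whole list object ([gene1, gene2] etc.), a value outside the declared list[list[str]] return type.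
def Pre_get_oneway (relations : List (List String)) (gene1 : List String) (gene2 : List String) : Prop :=
  ¬ ((gene1.length = 1 ∧ 1 ≤ gene2.length) ∨ (2 ≤ gene1.length ∧ gene2.length = 1))
instance (relations : List (List String)) (gene1 : List String) (gene2 : List String) : Decidable (Pre_get_oneway relations gene1 gene2) := by unfold Pre_get_oneway; infer_instance

def pvWitness_get_oneway : List (List String) × List String × List String :=
  ([["p", "q"]], ["a", "b"], ["x", "y"])

def Spec_get_oneway (relations : List (List String)) (gene1 : List String) (gene2 : List String) (out : List (List String)) : Prop := out = get_oneway_alt relations gene1 gene2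
instance (relations : List (List String)) (gene1 : List String) (gene2 : List String) (out : List (List String)) : Decidable (Spec_get_oneway relations gene1 gene2 out) := by unfold Spec_get_oneway; infer_instance

-- ===== CLAIM (what is proved, stated in full; the proofs are below) =====
def Claim_equal_get_oneway : Prop := ∀ (relations : List (List String)) (gene1 : List String) (gene2 : List String), Dom_get_oneway relations gene1 gene2 → Pre_get_oneway relations gene1 gene2 → Spec_get_oneway relations gene1 gene2 (get_oneway relations gene1 gene2)

-- ===== LEMMAS AND PROOFS =====

theorem map_range_getD (xs : List String) :
    (PySem.List.pyRange 0 (xs.length : Int) 1).map (fun j => PySem.List.pyGetD xs j "") = xs := by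
  have h := PySem.List.map_pyGetD_pyRange_zero (xs := xs) (d := "")
  simpa [PySem.List.len] using h

-- A's branch-3 double loop equals B's flatMap product.
theorem loop3_eq (relations : List (List String)) (gene1 gene2 : List String) :
    (PySem.List.pyRange 0 (gene1.length : Int) 1).foldl
      (fun acc i =>
        (PySem.List.pyRange 0 (gene2.length : Int) 1).foldl
          (fun acc2 j => acc2 ++ [[PySem.List.pyGetD gene1 i "", PySem.List.pyGetD gene2 j ""]]) acc)
      relations
    = relations ++ gene1.flatMap (fun l => gene2.map (fun r => [l, r])) := by
  have hinner : ∀ (i : Int) (acc : List (List String)),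
      (PySem.List.pyRange 0 (gene2.length : Int) 1).foldl
          (fun acc2 j => acc2 ++ [[PySem.List.pyGetD gene1 i "", PySem.List.pyGetD gene2 j ""]]) acc
        = acc ++ (PySem.List.pyRange 0 (gene2.length : Int) 1).map
            (fun j => [PySem.List.pyGetD gene1 i "", PySem.List.pyGetD gene2 j ""]) := by
    intro i acc
    exact PySem.List.foldl_append_singleton_eq_map _ _ _
  simp only [hinner]
  rw [PySem.List.foldl_append_eq_flatMap]
  congr 1
  have h2 : ∀ (i : Int),
      (PySem.List.pyRange 0 (gene2.length : Int) 1).map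
          (fun j => [PySem.List.pyGetD gene1 i "", PySem.List.pyGetD gene2 j ""])
        = gene2.map (fun r => [PySem.List.pyGetD gene1 i "", r]) := by
    intro i
    conv_rhs => rw [← map_range_getD gene2]
    rw [List.map_map]
    rfl
  simp only [h2]
  conv_rhs => rw [← map_range_getD gene1]
  rw [List.flatMap_map]

-- ===== VERDICT (by name: the statement is the Claim_ definition above) =====
theorem get_oneway_spec : Claim_equal_get_oneway := by
  intro relations gene1 gene2 _ hpre
  unfold Spec_get_oneway
  unfold Pre_get_oneway at hpre
  by_cases h1 : gene1.length = 1
  · -- admitted only with gene2 empty: both sides append nothing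
    have hg2 : gene2 = [] := List.eq_nil_of_length_eq_zero (by omega)
    subst hg2
    have ht : test_nbgenes gene1 [] = 2 := by
      unfold test_nbgenes; rw [if_pos h1, if_neg (by simp)]
    unfold get_oneway
    rw [ht, if_neg (by norm_num), if_neg (by norm_num), if_pos rfl]
    unfold get_oneway_alt
    simp
  · by_cases h2 : gene2.length = 1
    · -- admitted only with gene1 empty
      have hg1 : gene1 = [] := List.eq_nil_of_length_eq_zero (by omega)
      subst hg1
      have ht : test_nbgenes [] gene2 = 1 := by
        unfold test_nbgenes; rw [if_neg (by simp), if_pos h2]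
      unfold get_oneway
      rw [ht, if_neg (by norm_num), if_pos rfl]
      unfold get_oneway_alt
      simp
    · have ht : test_nbgenes gene1 gene2 = 3 := by
        unfold test_nbgenes; rw [if_neg h1, if_neg h2]
      unfold get_oneway
      rw [ht, if_neg (by norm_num), if_neg (by norm_num), if_neg (by norm_num)]
      exact loop3_eq relations gene1 gene2
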